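-- pv_equiv track=rewrite | github.com/Victor-Grinan-Dev/some_corey_shaffer_lessons | random exercises from internet/solved_CodingBat _practice.py | make_chocolate
-- ===== SOURCE A (Python) =====
-- def make_chocolate(small, big, goal):
--     """works fine, not in the page"""
--     leftover = goal
--     big_value = 5
--     for bar in range(big):
--         if leftover - big_value >= 0:
--             leftover -= big_value
--
--     if leftover <= small and leftover >= 0:
--         return leftover
--
--     return -1
-- ===== SOURCE B (Python) =====
-- def make_chocolate(small, big, goal):
--     """works fine, not in the page"""
--     if goal < 0:
--         return -1
--     leftover = goal - 5 * min(max(big, 0), goal // 5)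
--     return leftover if leftover <= small else -1
-- ===== Notes on version B (the rewrite author's own statement) =====
-- stated objective: faster
-- what changed: Replaces A's O(big) loop that subtracts 5 per big bar with the closed form leftover = goal - 5*min(max(big,0), goal//5) (after an early -1 for negative goal).
import Mathlib
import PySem

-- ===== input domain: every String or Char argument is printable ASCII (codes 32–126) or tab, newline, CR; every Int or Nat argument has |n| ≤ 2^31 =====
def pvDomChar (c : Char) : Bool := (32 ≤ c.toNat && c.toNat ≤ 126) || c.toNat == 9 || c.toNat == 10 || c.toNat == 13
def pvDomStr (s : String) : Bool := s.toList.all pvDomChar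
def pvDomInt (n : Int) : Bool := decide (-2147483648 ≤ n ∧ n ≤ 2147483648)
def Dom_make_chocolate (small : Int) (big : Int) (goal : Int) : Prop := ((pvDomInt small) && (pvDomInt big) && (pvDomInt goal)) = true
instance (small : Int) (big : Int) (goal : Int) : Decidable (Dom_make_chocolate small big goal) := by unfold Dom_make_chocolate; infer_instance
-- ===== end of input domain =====

-- B replaces A's O(big) subtraction loop by the closed form goal - 5*min(max(big,0), goal//5); O(1), equal return value everywhere.

-- ===== PORT A =====
def make_chocolate (small : Int) (big : Int) (goal : Int) : Int :=
  -- for bar in range(big): if leftover - 5 >= 0: leftover -= 5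
  let leftover := (PySem.List.pyRange 0 big 1).foldl
    (fun lo _ => if lo - 5 ≥ 0 then lo - 5 else lo) goal
  if leftover ≤ small ∧ leftover ≥ 0 then leftover else -1

-- ===== PORT B =====
def make_chocolate_alt (small : Int) (big : Int) (goal : Int) : Int :=
  if goal < 0 then -1
  else
    let leftover := goal - 5 * min (max big 0) (PySem.Int.floordiv goal 5)
    if leftover ≤ small then leftover else -1

-- ===== PRECONDITION & SPEC =====
def Spec_make_chocolate (small : Int) (big : Int) (goal : Int) (out : Int) : Prop := out = make_chocolate_alt small big goal
instance (small : Int) (big : Int) (goal : Int) (out : Int) : Decidable (Spec_make_chocolate small big goal out) := by unfold Spec_make_chocolate; infer_instance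

-- ===== CLAIM (what is proved, stated in full; the proofs are below) =====
def Claim_equal_make_chocolate : Prop := ∀ (small : Int) (big : Int) (goal : Int), Dom_make_chocolate small big goal → Spec_make_chocolate small big goal (make_chocolate small big goal)

-- ===== LEMMAS AND PROOFS =====

-- the loop body ignores the loop variable: the fold is an iterate of the step
theorem foldl_const_step {α : Type} (f : Int → Int) (l : List α) (g : Int) :
    l.foldl (fun lo _ => f lo) g = f^[l.length] g := by
  induction l generalizing g with
  | nil => rfl
  | cons x xs ih => simpa [Function.iterate_succ_apply] using ih (f g)

theorem iter_step_nonneg (n : Nat) (g : Int) (hg : 0 ≤ g) :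
    (fun lo => if lo - 5 ≥ 0 then lo - 5 else lo)^[n] g
      = g - 5 * min (n : Int) (PySem.Int.floordiv g 5) := by
  rw [PySem.Int.floordiv_eq_ediv_of_pos (by norm_num)]
  induction n generalizing g with
  | zero => simp [min_def]; omega
  | succ n ih =>
    rw [Function.iterate_succ_apply]
    by_cases h5 : (5 : Int) ≤ g
    · rw [show (if g - 5 ≥ 0 then g - 5 else g) = g - 5 from if_pos (by omega),
         ih (g - 5) (by omega)]
      simp [min_def]; split_ifs <;> omega
    · rw [show (if g - 5 ≥ 0 then g - 5 else g) = g from if_neg (by omega),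
         ih g hg]
      simp [min_def]; split_ifs <;> omega

theorem iter_step_neg (n : Nat) (g : Int) (hg : g < 0) :
    (fun lo => if lo - 5 ≥ 0 then lo - 5 else lo)^[n] g = g := by
  induction n with
  | zero => rfl
  | succ n ih =>
    rw [Function.iterate_succ_apply]
    rw [show (if g - 5 ≥ 0 then g - 5 else g) = g from if_neg (by omega), ih]

-- ===== VERDICT (by name: the statement is the Claim_ definition above) =====
theorem make_chocolate_spec : Claim_equal_make_chocolate := by
  intro small big goal _
  unfold Spec_make_chocolate make_chocolate make_chocolate_alt
  rw [foldl_const_step, PySem.List.length_pyRange_one]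
  by_cases hg : goal < 0
  · rw [iter_step_neg _ _ hg]
    simp; omega
  · rw [iter_step_nonneg _ _ (by omega),
        PySem.Int.floordiv_eq_ediv_of_pos (by norm_num)]
    have hdiv : 0 ≤ goal / 5 ∧ 5 * (goal / 5) ≤ goal := by omega
    have hcast : ((big - 0).toNat : Int) = max big 0 := by omega
    rw [hcast]
    simp only [min_def]
    split_ifs <;> omega
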